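-- pv_equiv track=rewrite | github.com/l1ghtspeed/Programming-Notes | Practice Problems/ieeeCompetition/Q2_300010911.py | songPairs
-- ===== SOURCE A (Python) =====
-- def songPairs(A):
--     d = {}
--     count = 0
--     for duration in A:
--         seconds = 60-(duration%60)
--         if duration in d:
--             count += d[duration]
--         if seconds not in d:
--             d[seconds] = 1
--         else:
--             d[seconds] += 1
--
--     return count
-- ===== SOURCE B (Python) =====
-- def songPairs(A):
--     counts = {}
--     for x in A:
--         counts[x] = counts.get(x, 0) + 1
--     total = 0
--     for x in A:
--         counts[x] -= 1
--         total += counts.get(60 - (x % 60), 0)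
--     return total
-- ===== Notes on version B (the rewrite author's own statement) =====
-- stated objective: alternative
-- what changed: A streams once, keying a growing table by the complement of each past element and looking it up by raw value; B first builds a full frequency counter of A, then for each element decrements its own count and looks up the complement among the elements strictly to its right.
import Mathlib
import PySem

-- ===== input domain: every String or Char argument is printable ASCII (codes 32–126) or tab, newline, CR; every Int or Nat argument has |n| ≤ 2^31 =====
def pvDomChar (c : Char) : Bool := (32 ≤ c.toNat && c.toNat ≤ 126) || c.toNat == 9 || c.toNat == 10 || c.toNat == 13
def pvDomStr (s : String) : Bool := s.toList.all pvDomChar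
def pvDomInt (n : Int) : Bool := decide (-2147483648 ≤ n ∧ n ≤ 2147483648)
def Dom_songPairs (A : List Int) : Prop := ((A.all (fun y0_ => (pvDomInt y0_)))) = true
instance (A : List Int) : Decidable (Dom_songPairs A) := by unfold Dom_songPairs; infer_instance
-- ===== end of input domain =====

-- B replaces A's incremental table of past complements with a pre-built frequency counter
-- of the whole list, decremented in a second pass (alternative decomposition, same cost).

-- ===== PORT A =====
def songPairs (A : List Int) : Int :=
  (A.foldl
    (fun (st : PySem.Dict Int Int × Int) duration =>
      let d := st.1
      let seconds := 60 - PySem.Int.mod duration 60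
      let count := if d.contains duration then st.2 + d.getD duration 0 else st.2
      let d := if !(d.contains seconds) then d.insert seconds 1
               else d.insert seconds (d.getD seconds 0 + 1)
      (d, count))
    (PySem.Dict.empty, 0)).2

-- ===== PORT B =====
def songPairs_alt (A : List Int) : Int :=
  let counts := A.foldl (fun (c : PySem.Dict Int Int) x => c.modify x 0 (· + 1)) PySem.Dict.empty
  (A.foldl
    (fun (st : PySem.Dict Int Int × Int) x =>
      let c := st.1.modify x 0 (· - 1)
      (c, st.2 + c.getD (60 - PySem.Int.mod x 60) 0))
    (counts, 0)).2

-- ===== PRECONDITION & SPEC =====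
def Spec_songPairs (A : List Int) (out : Int) : Prop := out = songPairs_alt A
instance (A : List Int) (out : Int) : Decidable (Spec_songPairs A out) := by unfold Spec_songPairs; infer_instance

-- ===== CLAIM (what is proved, stated in full; the proofs are below) =====
def Claim_equal_songPairs : Prop := ∀ (A : List Int), Dom_songPairs A → Spec_songPairs A (songPairs A)

-- ===== LEMMAS AND PROOFS =====

-- number of pairs j < i with A[i] = 60 - (A[j] % 60), recursing on the earlier element
def pvPairs : List Int → Int
  | [] => 0
  | x :: xs => (xs.count (60 - PySem.Int.mod x 60) : Int) + pvPairs xs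

def pvStepA (st : PySem.Dict Int Int × Int) (duration : Int) : PySem.Dict Int Int × Int :=
  let d := st.1
  let seconds := 60 - PySem.Int.mod duration 60
  let count := if d.contains duration then st.2 + d.getD duration 0 else st.2
  let d := if !(d.contains seconds) then d.insert seconds 1
           else d.insert seconds (d.getD seconds 0 + 1)
  (d, count)

def pvStepB (st : PySem.Dict Int Int × Int) (x : Int) : PySem.Dict Int Int × Int :=
  let c := st.1.modify x 0 (· - 1)
  (c, st.2 + c.getD (60 - PySem.Int.mod x 60) 0)

-- sum of d-lookups over a list
def pvS (d : PySem.Dict Int Int) : List Int → Int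
  | [] => 0
  | y :: ys => d.getD y 0 + pvS d ys

lemma pvStepA_eq (d : PySem.Dict Int Int) (c duration : Int) :
    pvStepA (d, c) duration
      = (d.insert (60 - PySem.Int.mod duration 60) (d.getD (60 - PySem.Int.mod duration 60) 0 + 1),
         c + d.getD duration 0) := by
  unfold pvStepA
  generalize 60 - PySem.Int.mod duration 60 = s
  have hcnt : (if d.contains duration then c + d.getD duration 0 else c) = c + d.getD duration 0 := by
    by_cases h : d.contains duration = true
    · simp [h]
    · rw [PySem.Dict.getD_of_not_contains d 0 (by simpa using h)]; simp
  have hd : (if !(d.contains s) then d.insert s 1 else d.insert s (d.getD s 0 + 1))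
      = d.insert s (d.getD s 0 + 1) := by
    by_cases h : d.contains s = true
    · simp [h]
    · rw [PySem.Dict.getD_of_not_contains d 0 (by simpa using h)]; simp [h]
  simp only [hcnt, hd]

lemma pvS_insert (xs : List Int) (d : PySem.Dict Int Int) (k : Int) :
    pvS (d.insert k (d.getD k 0 + 1)) xs = pvS d xs + (xs.count k : Int) := by
  induction xs with
  | nil => simp [pvS]
  | cons y ys ih =>
    simp only [pvS, List.count_cons, ih, PySem.Dict.getD_insert]
    by_cases hy : y = k
    · simp [hy]; ring
    · simp [hy]; ring

lemma pvLoopA (xs : List Int) : ∀ (d : PySem.Dict Int Int) (c : Int),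
    (xs.foldl pvStepA (d, c)).2 = c + pvS d xs + pvPairs xs := by
  induction xs with
  | nil => intro d c; simp [pvS, pvPairs]
  | cons x ys ih =>
    intro d c
    rw [List.foldl_cons, pvStepA_eq, ih, pvS_insert]
    simp only [pvS, pvPairs]
    ring

lemma pvLoopB (xs : List Int) : ∀ (c : PySem.Dict Int Int) (acc : Int),
    (∀ y, c.getD y 0 = (xs.count y : Int)) →
    (xs.foldl pvStepB (c, acc)).2 = acc + pvPairs xs := by
  induction xs with
  | nil => intro c acc _; simp [pvPairs]
  | cons x ys ih =>
    intro c acc hc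
    have hc' : ∀ y, (c.modify x 0 (· - 1)).getD y 0 = (ys.count y : Int) := by
      intro y
      by_cases hy : y = x
      · subst hy
        rw [PySem.Dict.getD_modify_self, hc]
        simp
      · rw [PySem.Dict.getD_modify_of_ne c 0 _ hy, hc]
        have hxy : ¬ x = y := fun h => hy h.symm
        simp [hxy]
    rw [List.foldl_cons]
    show (ys.foldl pvStepB (c.modify x 0 (· - 1),
        acc + (c.modify x 0 (· - 1)).getD (60 - PySem.Int.mod x 60) 0)).2 = _
    rw [ih _ _ hc', hc']
    simp only [pvPairs]
    ring

lemma pvS_empty (xs : List Int) : pvS PySem.Dict.empty xs = 0 := by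
  induction xs with
  | nil => simp [pvS]
  | cons x xs ih =>
    simp only [pvS, ih]
    rw [PySem.Dict.getD_of_not_contains _ 0 (by rfl)]
    ring

lemma songPairs_eq_pvPairs (A : List Int) : songPairs A = pvPairs A := by
  have h : songPairs A = (A.foldl pvStepA (PySem.Dict.empty, 0)).2 := rfl
  rw [h, pvLoopA, pvS_empty]
  ring

lemma songPairs_alt_eq_pvPairs (A : List Int) : songPairs_alt A = pvPairs A := by
  have h : songPairs_alt A = (A.foldl pvStepB (PySem.Dict.counter A, 0)).2 := rfl
  rw [h, pvLoopB]
  · ring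
  · intro y
    rw [PySem.Dict.getD_counter]

-- ===== VERDICT (by name: the statement is the Claim_ definition above) =====
theorem songPairs_spec : Claim_equal_songPairs := by
  intro A _
  unfold Spec_songPairs
  rw [songPairs_eq_pvPairs, songPairs_alt_eq_pvPairs]
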